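-- pv_equiv track=rewrite | github.com/dylangamachefl/pod-scribe | rag-service/src/utils/chunking.py | get_transcript_body
-- ===== SOURCE A (Python) =====
-- from typing import List, Dict
--
-- def get_transcript_body(transcript_content: str) -> List[str]:
--     """
--     Extract transcript body (without metadata header).
--
--     Args:
--         transcript_content: Full transcript text
--
--     Returns:
--         List of transcript lines
--     """
--     lines = transcript_content.split('\n')
--
--     # Find separator
--     separator_index = 0
--     for i, line in enumerate(lines):
--         if "========" in line:
--             separator_index = i + 1
--             break
--
--     # Return lines after separator
--     return [line for line in lines[separator_index:] if line.strip()]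
-- ===== SOURCE B (Python) =====
-- from typing import List
--
-- def get_transcript_body(transcript_content: str) -> List[str]:
--     """Extract transcript body: everything after the line containing the
--     '========' separator (or the whole text if there is none), keeping only
--     non-blank lines. Works on the raw string instead of indexing a line list."""
--     idx = transcript_content.find("========")
--     if idx == -1:
--         body = transcript_content
--     else:
--         nl = transcript_content.find("\n", idx)
--         body = "" if nl == -1 else transcript_content[nl + 1:]
--     return [line for line in body.split("\n") if line.strip()]
-- ===== Notes on version B (the rewrite author's own statement) =====
-- stated objective: simpler
-- what changed: B never builds or enumerates a line list to locate the separator: it works on the raw string with str.find for the separator and the following newline, slices the body off, and only then splits and filters, replacing A's enumerate-and-break loop over split lines plus list slicing.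
import Mathlib
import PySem

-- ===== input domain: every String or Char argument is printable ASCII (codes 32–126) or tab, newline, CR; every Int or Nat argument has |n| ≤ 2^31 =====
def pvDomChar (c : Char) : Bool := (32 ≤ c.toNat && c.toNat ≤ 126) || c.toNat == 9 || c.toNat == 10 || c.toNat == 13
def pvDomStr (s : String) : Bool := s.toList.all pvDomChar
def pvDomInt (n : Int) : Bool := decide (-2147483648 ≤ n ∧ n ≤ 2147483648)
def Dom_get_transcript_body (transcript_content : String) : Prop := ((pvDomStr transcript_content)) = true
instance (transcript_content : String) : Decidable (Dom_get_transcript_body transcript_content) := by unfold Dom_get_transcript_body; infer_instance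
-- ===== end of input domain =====

-- B locates the '========' separator and the following newline on the raw string (str.find + slice)
-- instead of A's enumerate-and-break loop over a pre-split line list; same return value, simpler flow.


-- truthiness of `line.strip()` (shared by both Pythons' filtering comprehension)
def pvNonblank (l : List Char) : Bool := !(PySem.Chars.strip l).isEmpty

-- ===== PORT A =====
-- A's `for i, line in enumerate(lines): if "========" in line: separator_index = i + 1; break`
def pvSepLoop (ls : List (List Char)) (i : Nat) : Nat :=
  match ls with
  | [] => 0
  | l :: r => if PySem.Chars.isIn "========".toList l then i + 1 else pvSepLoop r (i + 1)

-- core of A on the code points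
def pvACore (s : List Char) : List (List Char) :=
  let lines := PySem.Chars.splitOn s ['\n']
  let sepIdx := pvSepLoop lines 0
  (PySem.List.slice lines (some (sepIdx : Int)) none).filter pvNonblank

def get_transcript_body (transcript_content : String) : List String :=
  (pvACore transcript_content.toList).map String.ofList

-- ===== PORT B =====
-- core of B on the code points: find separator, find next newline, slice off the body, split, filter
def pvBCore (s : List Char) : List (List Char) :=
  let idx := PySem.Chars.find s "========".toList
  let body :=
    if idx = -1 then s
    else
      let nl := PySem.Chars.findFrom s ['\n'] idx
      if nl = -1 then [] else PySem.List.slice s (some (nl + 1)) none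
  (PySem.Chars.splitOn body ['\n']).filter pvNonblank

def get_transcript_body_alt (transcript_content : String) : List String :=
  (pvBCore transcript_content.toList).map String.ofList

-- ===== PRECONDITION & SPEC =====
def Spec_get_transcript_body (transcript_content : String) (out : List String) : Prop := out = get_transcript_body_alt transcript_content
instance (transcript_content : String) (out : List String) : Decidable (Spec_get_transcript_body transcript_content out) := by unfold Spec_get_transcript_body; infer_instance

-- ===== CLAIM (what is proved, stated in full; the proofs are below) =====
def Claim_equal_get_transcript_body : Prop := ∀ (transcript_content : String), Dom_get_transcript_body transcript_content → Spec_get_transcript_body transcript_content (get_transcript_body transcript_content)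


-- ===== LEMMAS AND PROOFS =====


theorem pv_go_acc (sep : List Char) :
    ∀ (fuel : Nat) (l cur : List Char) (acc : List (List Char)),
      PySem.Chars.splitOn.go sep fuel l cur acc
        = acc.reverse ++ PySem.Chars.splitOn.go sep fuel l cur [] := by
  intro fuel
  induction fuel with
  | zero => intro l cur acc; rw [PySem.Chars.splitOn.go, PySem.Chars.splitOn.go]; simp
  | succ fuel ih =>
    intro l cur acc
    cases l with
    | nil =>
      rw [PySem.Chars.splitOn.go, PySem.Chars.splitOn.go]
      · simp
      all_goals omega
    | cons c rest =>
      rw [PySem.Chars.splitOn.go, PySem.Chars.splitOn.go]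
      by_cases h : sep.isPrefixOf (c :: rest) = true
      · simp only [h, if_true]
        rw [ih _ _ (cur.reverse :: acc), ih _ _ [cur.reverse]]
        simp
      · simp only [h]
        exact ih ..

theorem pv_go_noNl :
    ∀ (fuel : Nat) (l cur : List Char) (acc : List (List Char)), '\n' ∉ l →
      PySem.Chars.splitOn.go ['\n'] fuel l cur acc = ((cur.reverse ++ l) :: acc).reverse := by
  intro fuel
  induction fuel with
  | zero => intro l cur acc _; rw [PySem.Chars.splitOn.go]
  | succ fuel ih =>
    intro l cur acc h
    cases l with
    | nil =>
      rw [PySem.Chars.splitOn.go]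
      · simp
      all_goals omega
    | cons c rest =>
      have hc : c ≠ '\n' := fun hc => h (by simp [hc])
      rw [PySem.Chars.splitOn.go]
      have hp : List.isPrefixOf ['\n'] (c :: rest) = false := by
        simp [List.isPrefixOf, Ne.symm hc]
      simp only [hp]
      rw [ih rest (c :: cur) acc (fun hm => h (by simp [hm]))]
      simp

theorem pv_splitOn_no_nl (s : List Char) (h : '\n' ∉ s) :
    PySem.Chars.splitOn s ['\n'] = [s] := by
  rw [PySem.Chars.splitOn, pv_go_noNl _ _ _ _ h]; simp

theorem pv_go_step :
    ∀ (l rest cur : List Char) (acc : List (List Char)) (fuel : Nat), '\n' ∉ l →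
      PySem.Chars.splitOn.go ['\n'] (fuel + l.length + 1) (l ++ '\n' :: rest) cur acc
        = PySem.Chars.splitOn.go ['\n'] fuel rest [] ((cur.reverse ++ l) :: acc) := by
  intro l
  induction l with
  | nil =>
    intro rest cur acc fuel _
    simp only [List.nil_append, List.length_nil, Nat.add_zero]
    rw [PySem.Chars.splitOn.go]
    have hp : List.isPrefixOf ['\n'] ('\n' :: rest) = true := by simp [List.isPrefixOf]
    simp [hp]
  | cons c l' ih =>
    intro rest cur acc fuel h
    have hc : c ≠ '\n' := fun hc => h (by simp [hc])
    rw [show fuel + (c :: l').length + 1 = (fuel + l'.length + 1) + 1 from by simp; omega]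
    simp only [List.cons_append]
    rw [PySem.Chars.splitOn.go]
    have hp : List.isPrefixOf ['\n'] (c :: (l' ++ '\n' :: rest)) = false := by
      simp [List.isPrefixOf, Ne.symm hc]
    simp only [hp]
    rw [ih rest (c :: cur) acc fuel (fun hm => h (by simp [hm]))]
    simp

theorem pv_splitOn_cons (l rest : List Char) (h : '\n' ∉ l) :
    PySem.Chars.splitOn (l ++ '\n' :: rest) ['\n'] = l :: PySem.Chars.splitOn rest ['\n'] := by
  rw [PySem.Chars.splitOn, PySem.Chars.splitOn]
  rw [show (l ++ '\n' :: rest).length + 1 = (rest.length + 1) + l.length + 1 from by simp; omega]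
  rw [pv_go_step l rest [] [] (rest.length + 1) h, pv_go_acc]
  simp


theorem pv_prefix_cut {sep a b : List Char} (hnl : '\n' ∉ sep)
    (h : sep <+: a ++ '\n' :: b) : sep <+: a := by
  by_cases hle : sep.length ≤ a.length
  · have heq : sep = (a ++ '\n' :: b).take sep.length := by
      obtain ⟨t, ht⟩ := h
      rw [← ht]; simp
    rw [List.take_append_of_le_length hle] at heq
    exact heq ▸ List.take_prefix _ _
  · exfalso
    push_neg at hle
    obtain ⟨t, ht⟩ := h
    have h1 : sep[a.length]'hle = '\n' := by
      have e1 : (sep ++ t)[a.length]'(by simp; omega) = sep[a.length]'hle :=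
        List.getElem_append_left (by omega)
      have e2 : (sep ++ t)[a.length]'(by simp; omega) = (a ++ '\n' :: b)[a.length]'(by simp) :=
        List.getElem_of_eq ht _
      have e3 : (a ++ '\n' :: b)[a.length]'(by simp) = '\n' := by
        rw [List.getElem_append_right (le_refl _)]
        simp
      rw [← e1, e2, e3]
    exact hnl (h1 ▸ List.getElem_mem _)

theorem pv_exists_drop {sep s : List Char} :
    sep <:+: s ↔ ∃ j, sep <+: s.drop j := by
  rw [← PySem.Chars.isIn_iff_infix, ← PySem.Chars.exists_prefix_drop_iff_isIn]

theorem pv_infix_split {sep : List Char} (a b : List Char) (hnl : '\n' ∉ sep) :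
    sep <:+: a ++ '\n' :: b ↔ sep <:+: a ∨ sep <:+: b := by
  constructor
  · intro h
    obtain ⟨j, hj⟩ := pv_exists_drop.1 h
    by_cases hle : j ≤ a.length
    · rw [List.drop_append_of_le_length hle] at hj
      exact Or.inl (pv_exists_drop.2 ⟨j, pv_prefix_cut hnl hj⟩)
    · push_neg at hle
      rw [show j = a.length + ((j - a.length - 1) + 1) from by omega, List.drop_append,
        show a.length + (j - a.length - 1 + 1) - a.length = (j - a.length - 1) + 1 from by omega,
        List.drop_succ_cons, List.drop_eq_nil_of_le (by omega), List.nil_append] at hj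
      exact Or.inr (pv_exists_drop.2 ⟨_, hj⟩)
  · rintro (h | h)
    · exact h.trans ((a.prefix_append ('\n' :: b)).isInfix)
    · exact h.trans (((b.suffix_cons '\n').trans (List.suffix_append a ('\n' :: b))).isInfix)

theorem pv_find_nl (a b : List Char) (h : '\n' ∉ a) :
    PySem.Chars.find (a ++ '\n' :: b) ['\n'] = (a.length : Int) := by
  have hinf : ['\n'] <:+: a ++ '\n' :: b := ⟨a, b, by simp⟩
  have h0 : 0 ≤ PySem.Chars.find (a ++ '\n' :: b) ['\n'] :=
    (PySem.Chars.find_nonneg_iff _ _).2 hinf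
  obtain ⟨hpre, hmin⟩ := PySem.Chars.find_spec h0
  set f := PySem.Chars.find (a ++ '\n' :: b) ['\n'] with hf
  have hle : f.toNat ≤ a.length := by
    by_contra hlt
    exact hmin a.length (by omega) (by rw [List.drop_left]; exact ⟨b, rfl⟩)
  have hge : a.length ≤ f.toNat := by
    by_contra hlt
    push_neg at hlt
    rw [List.drop_append_of_le_length (by omega),
      List.drop_eq_getElem_cons (by omega : f.toNat < a.length),
      List.cons_append, List.cons_prefix_cons] at hpre
    exact h (hpre.1 ▸ List.getElem_mem _)
  omega

theorem pv_find_in_first {sep : List Char} (a b : List Char) (hin : sep <:+: a) :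
    0 ≤ PySem.Chars.find (a ++ '\n' :: b) sep ∧
      (PySem.Chars.find (a ++ '\n' :: b) sep).toNat ≤ a.length := by
  obtain ⟨u, v, huv⟩ := hin
  have hlen : u.length ≤ a.length := by
    rw [← huv]; simp
  have hpre : sep <+: (a ++ '\n' :: b).drop u.length := by
    rw [← huv]
    rw [show u ++ sep ++ v = u ++ (sep ++ v) from by simp, List.append_assoc, List.drop_left]
    exact ⟨v ++ '\n' :: b, by simp⟩
  have h0 : 0 ≤ PySem.Chars.find (a ++ '\n' :: b) sep :=
    (PySem.Chars.find_nonneg_iff _ _).2 (pv_exists_drop.2 ⟨u.length, hpre⟩)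
  obtain ⟨_, hmin⟩ := PySem.Chars.find_spec h0
  refine ⟨h0, ?_⟩
  by_contra hlt
  exact hmin u.length (by omega) hpre

theorem pv_find_skip {sep : List Char} (a b : List Char) (hnl : '\n' ∉ sep)
    (hna : ¬ sep <:+: a) (hb : sep <:+: b) :
    PySem.Chars.find (a ++ '\n' :: b) sep = (a.length : Int) + 1 + PySem.Chars.find b sep := by
  have ht0 : 0 ≤ PySem.Chars.find b sep := (PySem.Chars.find_nonneg_iff _ _).2 hb
  obtain ⟨htpre, htmin⟩ := PySem.Chars.find_spec ht0
  set t := PySem.Chars.find b sep with htdef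
  have htlen : t.toNat ≤ b.length := by
    have := PySem.Chars.find_le_length b sep
    omega
  have hdropN : (a ++ '\n' :: b).drop (a.length + 1 + t.toNat) = b.drop t.toNat := by
    rw [show a.length + 1 + t.toNat = a.length + (1 + t.toNat) from by omega, List.drop_append,
      show a.length + (1 + t.toNat) - a.length = t.toNat + 1 from by omega,
      List.drop_succ_cons, List.drop_eq_nil_of_le (by omega), List.nil_append]
  have hs : sep <:+: a ++ '\n' :: b :=
    pv_exists_drop.2 ⟨a.length + 1 + t.toNat, by rw [hdropN]; exact htpre⟩
  have h0 : 0 ≤ PySem.Chars.find (a ++ '\n' :: b) sep :=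
    (PySem.Chars.find_nonneg_iff _ _).2 hs
  obtain ⟨hpre, hmin⟩ := PySem.Chars.find_spec h0
  set f := PySem.Chars.find (a ++ '\n' :: b) sep with hfdef
  have hle : f.toNat ≤ a.length + 1 + t.toNat := by
    by_contra hlt
    exact hmin (a.length + 1 + t.toNat) (by omega) (by rw [hdropN]; exact htpre)
  have hge : a.length + 1 + t.toNat ≤ f.toNat := by
    by_contra hlt
    push_neg at hlt
    by_cases hc : f.toNat ≤ a.length
    · rw [List.drop_append_of_le_length hc] at hpre
      exact hna (pv_exists_drop.2 ⟨f.toNat, pv_prefix_cut hnl hpre⟩)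
    · push_neg at hc
      rw [show f.toNat = a.length + ((f.toNat - a.length - 1) + 1) from by omega, List.drop_append,
        show a.length + (f.toNat - a.length - 1 + 1) - a.length = (f.toNat - a.length - 1) + 1 from by omega,
        List.drop_succ_cons, List.drop_eq_nil_of_le (by omega), List.nil_append] at hpre
      exact htmin (f.toNat - a.length - 1) (by omega) hpre
  omega

theorem pv_drop_shift (a b : List Char) (k : Nat) :
    (a ++ '\n' :: b).drop (a.length + 1 + k) = b.drop k := by
  rw [show a.length + 1 + k = a.length + (1 + k) from by omega, List.drop_append,
    show a.length + (1 + k) - a.length = k + 1 from by omega,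
    List.drop_succ_cons, List.drop_eq_nil_of_le (by omega), List.nil_append]
theorem pv_splitOn_nil : PySem.Chars.splitOn ([] : List Char) ['\n'] = [[]] := by decide
theorem pvSepLoop_nil (i : Nat) : pvSepLoop [] i = 0 := rfl
theorem pvSepLoop_cons (l : List Char) (r : List (List Char)) (i : Nat) :
    pvSepLoop (l :: r) i
      = if PySem.Chars.isIn "========".toList l then i + 1 else pvSepLoop r (i + 1) := rfl
theorem pv_seploop_shift (ls : List (List Char)) :
    ∀ i : Nat, pvSepLoop ls (i + 1)
      = if ls.any (fun x => PySem.Chars.isIn "========".toList x) then pvSepLoop ls i + 1 else 0 := by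
  induction ls with
  | nil => intro i; simp [pvSepLoop_nil]
  | cons l r ih =>
    intro i
    rw [pvSepLoop_cons, pvSepLoop_cons, List.any_cons]
    by_cases hl : PySem.Chars.isIn "========".toList l = true
    · rw [if_pos hl, hl]
      simp
    · have hl' : PySem.Chars.isIn "========".toList l = false := by simpa using hl
      rw [if_neg hl, if_neg hl, hl', Bool.false_or, ih]
theorem pv_decomp (s : List Char) :
    ('\n' ∉ s) ∨ ∃ l rest, s = l ++ '\n' :: rest ∧ '\n' ∉ l := by
  induction s with
  | nil => exact Or.inl (by simp)
  | cons c s' ih =>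
    by_cases hc : c = '\n'
    · exact Or.inr ⟨[], s', by simp [hc], by simp⟩
    · rcases ih with h | ⟨l, rest, heq, hl⟩
      · exact Or.inl (by simp [Ne.symm hc, h])
      · exact Or.inr ⟨c :: l, rest, by simp [heq], by simp [Ne.symm hc, hl]⟩

theorem pv_noNl_case (s : List Char) (h : '\n' ∉ s) :
    pvACore s = pvBCore s ∧
      (((PySem.Chars.splitOn s ['\n']).any (fun x => PySem.Chars.isIn "========".toList x) = true)
        ↔ "========".toList <:+: s) := by
  have hsp := pv_splitOn_no_nl s h
  constructor
  · simp only [pvACore, pvBCore]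
    by_cases hin : ("========".toList : List Char) <:+: s
    · have h0 : 0 ≤ PySem.Chars.find s "========".toList :=
        (PySem.Chars.find_nonneg_iff _ _).2 hin
      have hisin : PySem.Chars.isIn "========".toList s = true :=
        (PySem.Chars.isIn_iff_infix _ _).2 hin
      rw [hsp, pvSepLoop_cons, if_pos hisin]
      rw [show (((0 + 1 : Nat)) : Int) = ((1 : Nat) : Int) from by norm_num,
        PySem.List.slice_from_natCast]
      rw [if_neg (show ¬ PySem.Chars.find s "========".toList = -1 from by omega)]
      have hk : (PySem.Chars.find s "========".toList).toNat ≤ s.length := by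
        have := PySem.Chars.find_le_length s "========".toList
        omega
      rw [show PySem.Chars.find s "========".toList
          = (((PySem.Chars.find s "========".toList).toNat : Nat) : Int) from
          (Int.toNat_of_nonneg h0).symm]
      rw [PySem.Chars.findFrom_natCast s ['\n'] _ hk]
      have hnone : PySem.Chars.find (s.drop (PySem.Chars.find s "========".toList).toNat) ['\n'] = -1 :=
        (PySem.Chars.find_eq_neg_one_iff _ _).2
          (fun hc => h (List.mem_of_mem_drop (hc.subset (by simp))))
      rw [if_pos hnone, if_pos rfl, pv_splitOn_nil]
      rw [show List.drop 1 [s] = ([] : List (List Char)) from rfl]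
      decide
    · have hisin : PySem.Chars.isIn "========".toList s = false := by
        rw [Bool.eq_false_iff]
        exact fun hc => hin ((PySem.Chars.isIn_iff_infix _ _).1 hc)
      have hfind : PySem.Chars.find s "========".toList = -1 :=
        (PySem.Chars.find_eq_neg_one_iff _ _).2 hin
      rw [hsp, pvSepLoop_cons, if_neg (by simp only [Bool.not_eq_true]; exact hisin), pvSepLoop_nil,
        PySem.List.slice_from_natCast, if_pos hfind, hsp, List.drop_zero]
  · rw [hsp]
    simp only [List.any_cons, List.any_nil, Bool.or_false]
    exact PySem.Chars.isIn_iff_infix _ _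

theorem pv_main : ∀ (n : Nat) (s : List Char), s.length ≤ n →
    pvACore s = pvBCore s ∧
      (((PySem.Chars.splitOn s ['\n']).any (fun x => PySem.Chars.isIn "========".toList x) = true)
        ↔ "========".toList <:+: s) := by
  intro n
  induction n with
  | zero =>
    intro s hs
    have : s = [] := List.length_eq_zero_iff.1 (by omega)
    exact this ▸ pv_noNl_case [] (by simp)
  | succ n ih =>
    intro s hs
    rcases pv_decomp s with h | ⟨l, rest, heq, hl⟩
    · exact pv_noNl_case s h
    · subst heq
      have hrlen : rest.length ≤ n := by
        simp [List.length_append] at hs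
        omega
      obtain ⟨ihEq, ihAny⟩ := ih rest hrlen
      have hsp := pv_splitOn_cons l rest hl
      by_cases hinl : ("========".toList : List Char) <:+: l
      · -- separator occurs in the first line
        have hisl : PySem.Chars.isIn "========".toList l = true :=
          (PySem.Chars.isIn_iff_infix _ _).2 hinl
        constructor
        · simp only [pvACore, pvBCore]
          rw [hsp, pvSepLoop_cons, if_pos hisl]
          rw [show (((0 + 1 : Nat)) : Int) = ((1 : Nat) : Int) from by norm_num,
            PySem.List.slice_from_natCast, List.drop_succ_cons, List.drop_zero]
          obtain ⟨h0, hk⟩ := pv_find_in_first l rest hinl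
          rw [if_neg (show ¬ _ = (-1 : Int) from by omega)]
          have hklen : (PySem.Chars.find (l ++ '\n' :: rest) "========".toList).toNat
              ≤ (l ++ '\n' :: rest).length := by
            rw [List.length_append, List.length_cons]
            omega
          rw [show PySem.Chars.find (l ++ '\n' :: rest) "========".toList
              = (((PySem.Chars.find (l ++ '\n' :: rest) "========".toList).toNat : Nat) : Int) from
              (Int.toNat_of_nonneg h0).symm]
          rw [PySem.Chars.findFrom_natCast _ ['\n'] _ hklen]
          set k := (PySem.Chars.find (l ++ '\n' :: rest) "========".toList).toNat with hkdef
          have hfnl : PySem.Chars.find ((l ++ '\n' :: rest).drop k) ['\n']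
              = ((l.length - k : Nat) : Int) := by
            rw [List.drop_append_of_le_length hk,
              pv_find_nl (l.drop k) rest (fun hm => hl (List.mem_of_mem_drop hm)),
              List.length_drop]
          rw [if_neg (by rw [hfnl]; omega), hfnl]
          rw [if_neg (show ¬ (((l.length - k : Nat) : Int)) = -1 from by omega)]
          rw [show ((k : Int) + ((l.length - k : Nat) : Int) + 1)
              = (((l.length + 1 : Nat)) : Int) from by omega]
          rw [PySem.List.slice_from_natCast]
          rw [show l.length + 1 = l.length + 1 + 0 from by omega, pv_drop_shift, List.drop_zero]
        · rw [hsp, List.any_cons]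
          exact iff_of_true (by rw [hisl]; rfl)
            ((pv_infix_split l rest (by decide)).2 (Or.inl hinl))
      · have hisl : PySem.Chars.isIn "========".toList l = false := by
          rw [Bool.eq_false_iff]
          exact fun hc => hinl ((PySem.Chars.isIn_iff_infix _ _).1 hc)
        by_cases hinr : ("========".toList : List Char) <:+: rest
        · -- separator occurs later: both sides reduce to the tail
          have hanyr : (PySem.Chars.splitOn rest ['\n']).any
              (fun x => PySem.Chars.isIn "========".toList x) = true := ihAny.2 hinr
          have ht0 : 0 ≤ PySem.Chars.find rest "========".toList :=
            (PySem.Chars.find_nonneg_iff _ _).2 hinr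
          have htlen : (PySem.Chars.find rest "========".toList).toNat ≤ rest.length := by
            have := PySem.Chars.find_le_length rest "========".toList
            omega
          set t := PySem.Chars.find rest "========".toList with htdef
          have hskip : PySem.Chars.find (l ++ '\n' :: rest) "========".toList
              = (l.length : Int) + 1 + t := pv_find_skip l rest (by decide) hinl hinr
          have hA : pvACore (l ++ '\n' :: rest) = pvACore rest := by
            simp only [pvACore]
            rw [hsp, pvSepLoop_cons, if_neg (by simp only [Bool.not_eq_true]; exact hisl),
              pv_seploop_shift _ 0, if_pos hanyr, PySem.List.slice_from_natCast,
              PySem.List.slice_from_natCast, List.drop_succ_cons]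
          obtain ⟨u, hu⟩ : ∃ u : Nat, t = (u : Int) := ⟨t.toNat, (Int.toNat_of_nonneg ht0).symm⟩
          have hulen : u ≤ rest.length := by omega
          have hB : pvBCore (l ++ '\n' :: rest) = pvBCore rest := by
            simp only [pvBCore]
            rw [hskip, ← htdef, hu]
            rw [if_neg (show ¬ ((l.length : Int) + 1 + (u : Int)) = -1 from by omega),
              if_neg (show ¬ ((u : Int)) = -1 from by omega)]
            rw [show ((l.length : Int) + 1 + (u : Int)) = ((l.length + 1 + u : Nat) : Int) from by omega]
            rw [PySem.Chars.findFrom_natCast _ ['\n'] _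
              (by rw [List.length_append, List.length_cons]; omega)]
            rw [PySem.Chars.findFrom_natCast rest ['\n'] _ hulen]
            rw [pv_drop_shift]
            by_cases hF : PySem.Chars.find (rest.drop u) ['\n'] = -1
            · rw [if_pos hF, if_pos hF, if_pos rfl, if_pos rfl]
            · have hF0 : 0 ≤ PySem.Chars.find (rest.drop u) ['\n'] := by
                have := PySem.Chars.neg_one_le_find (rest.drop u) ['\n']
                omega
              obtain ⟨m, hm⟩ : ∃ m : Nat, PySem.Chars.find (rest.drop u) ['\n'] = (m : Int) :=
                ⟨_, (Int.toNat_of_nonneg hF0).symm⟩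
              rw [hm]
              rw [if_neg (show ¬ ((m : Int)) = -1 from by omega)]
              rw [if_neg (show ¬ ((m : Int)) = -1 from by omega)]
              rw [if_neg (show ¬ ((l.length + 1 + u : Nat) : Int) + (m : Int) = -1 from by omega)]
              rw [if_neg (show ¬ ((u : Int)) + (m : Int) = -1 from by omega)]
              rw [show ((l.length + 1 + u : Nat) : Int) + (m : Int) + 1
                  = ((l.length + 1 + (u + m + 1) : Nat) : Int) from by push_cast; omega]
              rw [show ((u : Int)) + (m : Int) + 1 = ((u + m + 1 : Nat) : Int) from by push_cast; omega]
              rw [PySem.List.slice_from_natCast, PySem.List.slice_from_natCast, pv_drop_shift]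
          refine ⟨hA.trans (ihEq.trans hB.symm), ?_⟩
          rw [hsp, List.any_cons]
          exact iff_of_true (by rw [hisl, hanyr]; rfl)
            ((pv_infix_split l rest (by decide)).2 (Or.inr hinr))
        · -- no separator anywhere
          have hanyr : (PySem.Chars.splitOn rest ['\n']).any
              (fun x => PySem.Chars.isIn "========".toList x) = false := by
            rw [Bool.eq_false_iff]
            exact fun hc => hinr (ihAny.1 hc)
          have hnos : ¬ ("========".toList : List Char) <:+: (l ++ '\n' :: rest) := by
            intro hc
            rcases (pv_infix_split l rest (by decide)).1 hc with hx | hx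
            exacts [hinl hx, hinr hx]
          have hfind : PySem.Chars.find (l ++ '\n' :: rest) "========".toList = -1 :=
            (PySem.Chars.find_eq_neg_one_iff _ _).2 hnos
          constructor
          · simp only [pvACore, pvBCore]
            rw [hsp, pvSepLoop_cons, if_neg (by simp only [Bool.not_eq_true]; exact hisl),
              pv_seploop_shift _ 0, if_neg (by rw [hanyr]; exact Bool.false_ne_true),
              PySem.List.slice_from_natCast, List.drop_zero, if_pos hfind, hsp]
          · rw [hsp, List.any_cons]
            exact iff_of_false (by rw [hisl, hanyr]; exact Bool.false_ne_true) hnos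

-- ===== VERDICT (by name: the statement is the Claim_ definition above) =====
theorem get_transcript_body_spec : Claim_equal_get_transcript_body := by
  intro tc _
  unfold Spec_get_transcript_body get_transcript_body get_transcript_body_alt
  exact congrArg _ (pv_main tc.toList.length tc.toList le_rfl).1
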